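-- pv_equiv track=rewrite | github.com/patricksu168/pdfToWordWebApp | api/pdftoword/pdfToWord.py | concatSpltNumString
-- ===== SOURCE A (Python) =====
-- def concatSpltNumString(list):
--     removelist = []
--     for i in range(1, len(list)):
--         l = list[i]
--         k = list[i - 1]
--         if l[0].isdigit() or l[0] == ',':
--             if k[len(k) - 1].isdigit() or k[len(k) - 1] == ',':
--                 list[i] = k + l
--                 removelist.append(i - 1)
--     for i in range(len(removelist) - 1, -1, -1):
--         list.pop(removelist[i])
--     return list
-- ===== SOURCE B (Python) =====
-- def concatSpltNumString(list):
--     result = []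
--     for s in list:
--         if result and (s[0].isdigit() or s[0] == ',') and \
--                 (result[-1][-1].isdigit() or result[-1][-1] == ','):
--             result[-1] = result[-1] + s
--         else:
--             result.append(s)
--     return result
-- ===== Notes on version B (the rewrite author's own statement) =====
-- stated objective: simpler
-- what changed: one left-to-right pass building a fresh result list and merging each string into its last element, instead of A's index loop over a mutated array followed by a second descending pop loop
import Mathlib
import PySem

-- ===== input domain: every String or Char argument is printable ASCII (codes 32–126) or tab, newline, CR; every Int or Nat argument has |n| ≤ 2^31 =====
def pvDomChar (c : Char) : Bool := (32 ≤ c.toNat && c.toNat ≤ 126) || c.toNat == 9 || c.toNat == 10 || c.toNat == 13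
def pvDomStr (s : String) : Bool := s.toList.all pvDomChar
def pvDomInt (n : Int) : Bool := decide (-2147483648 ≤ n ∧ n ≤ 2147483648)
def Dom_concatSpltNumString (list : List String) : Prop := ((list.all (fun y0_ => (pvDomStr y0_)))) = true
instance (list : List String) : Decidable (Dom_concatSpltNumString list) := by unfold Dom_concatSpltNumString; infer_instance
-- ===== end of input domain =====

-- B replaces A's index loop over a mutated array plus a second descending pop loop by one
-- simpler left-to-right pass that merges each string into the last element of a freshly built
-- result list. The equivalence proved here is about the RETURN value: Python A also mutates
-- its list argument in place, B does not.

-- ===== PORT A =====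
-- 'c.isdigit() or c == ","' for the single character c; Char.isDigit is exact on the ASCII domain
def pvDC (c : Char) : Bool := c.isDigit || c == ','

-- body of A's first loop: l = list[i]; k = list[i-1]; nested if; list[i] = k + l; removelist.append(i-1)
def pvStep1 (st : List String × List Int) (i : Int) : List String × List Int :=
  let l := (PySem.List.pyGet? st.1 i).getD ""
  let k := (PySem.List.pyGet? st.1 (i - 1)).getD ""
  if pvDC ((PySem.Str.pyGet? l 0).getD ' ') then
    if pvDC ((PySem.Str.pyGet? k (PySem.Str.len k - 1)).getD ' ') then
      (PySem.List.pySetD st.1 i (k ++ l), st.2 ++ [i - 1])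
    else st
  else st

-- body of A's second loop: list.pop(removelist[i])
def pvStep2 (rem : List Int) (lst : List String) (i : Int) : List String :=
  ((PySem.List.pop? lst ((PySem.List.pyGet? rem i).getD 0)).map Prod.snd).getD lst

def concatSpltNumString (list : List String) : List String :=
  let st := (PySem.List.pyRange 1 (list.length : Int) 1).foldl pvStep1 (list, ([] : List Int))
  (PySem.List.pyRange ((st.2.length : Int) - 1) (-1) (-1)).foldl (pvStep2 st.2) st.1

-- ===== PORT B =====
-- body of B's single loop: merge s into result[-1], or append it
def pvStepB (result : List String) (s : String) : List String :=
  if !result.isEmpty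
      && pvDC ((PySem.Str.pyGet? s 0).getD ' ')
      && pvDC ((PySem.Str.pyGet? ((PySem.List.pyGet? result (-1)).getD "") (-1)).getD ' ')
  then PySem.List.pySetD result (-1) (((PySem.List.pyGet? result (-1)).getD "") ++ s)
  else result ++ [s]

def concatSpltNumString_alt (list : List String) : List String :=
  list.foldl pvStepB []

-- ===== PRECONDITION & SPEC =====
-- Pre_ holds exactly where the Python A returns: A raises IndexError when an element past the
-- first is the empty string (l[0]), or when the first element is empty and the second starts
-- with a digit or comma (k[len(k)-1] on "").
def Pre_concatSpltNumString (list : List String) : Prop :=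
  (∀ s ∈ list.tail, s ≠ "") ∧
  (list.headD "x" = "" →
    (((PySem.Str.pyGet? (list.tail.headD "") 0).getD ' ').isDigit
      || (PySem.Str.pyGet? (list.tail.headD "") 0).getD ' ' == ',') = false)
instance (list : List String) : Decidable (Pre_concatSpltNumString list) := by
  unfold Pre_concatSpltNumString; infer_instance

def pvWitness_concatSpltNumString : List String := ["12", "3", "x,", ",7", "ab"]

def Spec_concatSpltNumString (list : List String) (out : List String) : Prop := out = concatSpltNumString_alt list
instance (list : List String) (out : List String) : Decidable (Spec_concatSpltNumString list out) := by unfold Spec_concatSpltNumString; infer_instance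

-- ===== CLAIM (what is proved, stated in full; the proofs are below) =====
def Claim_equal_concatSpltNumString : Prop := ∀ (list : List String), Dom_concatSpltNumString list → Pre_concatSpltNumString list → Spec_concatSpltNumString list (concatSpltNumString list)

-- ===== LEMMAS AND PROOFS =====

-- first character / last character of a string as A's and B's tests read them
def pvHeadD (s : String) : Char := s.toList.head?.getD ' '
def pvLastD (s : String) : Char := s.toList.getLast?.getD ' '
-- the merge test both loops perform, on the accumulated chain a and the next original string b
def pvGlue (a b : String) : Bool := pvDC (pvHeadD b) && pvDC (pvLastD a)

-- value held at each already-processed array position after A's first loop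
def pvChains (acc : String) : List String → List String
  | [] => []
  | b :: rest =>
    (if pvGlue acc b then acc ++ b else b) :: pvChains (if pvGlue acc b then acc ++ b else b) rest

-- A's removelist, as positions starting at p
def pvRemIdx (p : Nat) (acc : String) : List String → List Int
  | [] => []
  | b :: rest =>
    if pvGlue acc b then (p : Int) :: pvRemIdx (p + 1) (acc ++ b) rest
    else pvRemIdx (p + 1) b rest

-- the common result: merge a run into acc, start a new run on a failed test
def pvMergeRun (acc : String) : List String → List String
  | [] => [acc]
  | b :: rest => if pvGlue acc b then pvMergeRun (acc ++ b) rest else acc :: pvMergeRun b rest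

def pvPopStep (lst : List String) (j : Int) : List String :=
  ((PySem.List.pop? lst j).map Prod.snd).getD lst

theorem pv_strHead (s : String) : (PySem.Str.pyGet? s 0).getD ' ' = pvHeadD s := by
  simp [pvHeadD, pysem, PySem.List.pyGet?_zero, List.head?_eq_getElem?]

theorem pv_strLastA (s : String) :
    (PySem.Str.pyGet? s (PySem.Str.len s - 1)).getD ' ' = pvLastD s := by
  rcases h : s.toList with _ | ⟨c, cs⟩
  · simp [pvLastD, pysem, h, PySem.List.pyGet?]
  · have hlen : PySem.Str.len s - 1 = ((s.toList.length - 1 : ℕ) : Int) := by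
      simp [PySem.Str.len_eq, h]
    rw [hlen]
    simp [pvLastD, pysem, List.getLast?_eq_getElem?]

theorem pv_strLastB (s : String) : (PySem.Str.pyGet? s (-1)).getD ' ' = pvLastD s := by
  simp [pvLastD, pysem, PySem.List.pyGet?_neg_one]

theorem pv_set_mid (pre t : List String) (x v : String) :
    (pre ++ x :: t).set pre.length v = pre ++ v :: t := by
  induction pre with
  | nil => rfl
  | cons a l ih => simp [ih]

theorem pv_erase_mid (pre t : List String) (x : String) :
    (pre ++ x :: t).eraseIdx pre.length = pre ++ t := by
  induction pre with
  | nil => rfl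
  | cons a l ih => simp [ih]

theorem pv_setD_last (xs : List String) (x v : String) :
    PySem.List.pySetD (xs ++ [x]) (-1) v = xs ++ [v] := by
  simp [PySem.List.pySetD, PySem.List.pySet?, PySem.List.pyIdx?]

theorem pv_stepA (pre rest : List String) (acc b : String) (rem : List Int) :
    pvStep1 (pre ++ acc :: b :: rest, rem) ((pre.length : Int) + 1)
      = if pvGlue acc b then (pre ++ acc :: (acc ++ b) :: rest, rem ++ [(pre.length : Int)])
        else (pre ++ acc :: b :: rest, rem) := by
  have hsplit : (pre ++ acc :: b :: rest) = (pre ++ [acc]) ++ b :: rest := by simp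
  have hl : PySem.List.pyGet? (pre ++ acc :: b :: rest) ((pre.length : Int) + 1) = some b := by
    rw [hsplit]
    have h2 : (pre.length : Int) + 1 = (((pre ++ [acc]).length : ℕ) : Int) := by simp
    rw [h2, PySem.List.pyGet?_append_length]
  have hk : PySem.List.pyGet? (pre ++ acc :: b :: rest) ((pre.length : Int) + 1 - 1) = some acc := by
    have h2 : (pre.length : Int) + 1 - 1 = ((pre.length : ℕ) : Int) := by ring
    rw [h2, PySem.List.pyGet?_append_length]
  have hset : PySem.List.pySetD (pre ++ acc :: b :: rest) ((pre.length : Int) + 1) (acc ++ b)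
      = pre ++ acc :: (acc ++ b) :: rest := by
    have h2 : (pre.length : Int) + 1 = (((pre ++ [acc]).length : ℕ) : Int) := by simp
    rw [hsplit, h2, PySem.List.pySetD_natCast, pv_set_mid]
    simp
  have hidx : (pre.length : Int) + 1 - 1 = ((pre.length : ℕ) : Int) := by ring
  unfold pvStep1
  simp only [hl, Option.getD_some, pv_strHead, pv_strLastA, hidx]
  unfold pvGlue
  rcases hh : pvDC (pvHeadD b) <;> rcases hg : pvDC (pvLastD acc) <;> simp [hg, hset]

theorem pv_phase1 (rest : List String) : ∀ (pre : List String) (acc : String) (rem : List Int),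
    (PySem.List.pyRange ((pre.length : Int) + 1) ((pre.length : Int) + 1 + rest.length) 1).foldl
        pvStep1 (pre ++ acc :: rest, rem)
      = (pre ++ acc :: pvChains acc rest, rem ++ pvRemIdx pre.length acc rest) := by
  induction rest with
  | nil =>
    intro pre acc rem
    rw [PySem.List.pyRange_one_eq_nil (by simp)]
    simp [pvChains, pvRemIdx]
  | cons b rest ih =>
    intro pre acc rem
    rw [PySem.List.pyRange_one_cons (by simp only [List.length_cons]; push_cast; omega)]
    rw [List.foldl_cons, pv_stepA]
    have h2 : (pre.length : Int) + 1 + ((b :: rest).length : ℕ)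
        = (((pre ++ [acc]).length : ℕ) : Int) + 1 + (rest.length : ℕ) := by
      simp only [List.length_cons, List.length_append, List.length_cons, List.length_nil]
      push_cast; ring
    have h4 : (pre.length : Int) + 1 = (((pre ++ [acc]).length : ℕ) : Int) := by simp
    rcases hg : pvGlue acc b with _ | _
    · rw [if_neg (by simp)]
      have h3 : pre ++ acc :: b :: rest = (pre ++ [acc]) ++ b :: rest := by simp
      rw [h2, h3, h4, ih]
      simp [pvChains, pvRemIdx, hg]
    · rw [if_pos rfl]
      have h3 : pre ++ acc :: (acc ++ b) :: rest = (pre ++ [acc]) ++ (acc ++ b) :: rest := by simp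
      rw [h2, h3, h4, ih]
      simp [pvChains, pvRemIdx, hg]

theorem pv_popRange (rem : List Int) : ∀ (arr : List String),
    (List.range rem.length).foldr (fun k lst => pvPopStep lst (rem[k]?.getD 0)) arr
      = rem.foldr (fun j lst => pvPopStep lst j) arr := by
  induction rem with
  | nil => intro arr; rfl
  | cons r t ih =>
    intro arr
    simp only [List.length_cons, List.range_succ_eq_map, List.foldr_cons, List.foldr_map,
      List.getElem?_cons_succ, List.getElem?_cons_zero, Option.getD_some]
    rw [ih arr]

theorem pv_popFoldr (rem : List Int) (arr : List String) :
    (PySem.List.pyRange ((rem.length : Int) - 1) (-1) (-1)).foldl (pvStep2 rem) arr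
      = rem.foldr (fun j lst => pvPopStep lst j) arr := by
  rw [PySem.List.pyRange_neg_one_eq_reverse]
  have h1 : ((rem.length : Int) - 1) + 1 = ((rem.length : ℕ) : Int) := by ring
  have h2 : (-1 : Int) + 1 = 0 := by ring
  rw [h1, h2, List.foldl_reverse]
  rw [PySem.List.pyRange_zero_nat rem.length, List.foldr_map]
  have h4 : ∀ lst (k : ℕ), pvStep2 rem lst (k : Int) = pvPopStep lst (rem[k]?.getD 0) := by
    intro lst k
    simp [pvStep2, pvPopStep, PySem.List.pyGet?_natCast]
  simp only [h4]
  exact pv_popRange rem arr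

theorem pv_popMain (rest : List String) : ∀ (pre : List String) (acc : String),
    (pvRemIdx pre.length acc rest).foldr (fun j lst => pvPopStep lst j)
        (pre ++ acc :: pvChains acc rest)
      = pre ++ pvMergeRun acc rest := by
  induction rest with
  | nil => intro pre acc; simp [pvRemIdx, pvChains, pvMergeRun]
  | cons b rest ih =>
    intro pre acc
    rcases hg : pvGlue acc b with _ | _
    · simp only [pvRemIdx, pvChains, pvMergeRun, hg, Bool.false_eq_true, if_false]
      have h3 : pre ++ acc :: b :: pvChains b rest = (pre ++ [acc]) ++ b :: pvChains b rest := by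
        simp
      have h4 : pre.length + 1 = (pre ++ [acc]).length := by simp
      rw [h3, h4, ih]
      simp
    · simp only [pvRemIdx, pvChains, pvMergeRun, hg, if_true, List.foldr_cons]
      have h3 : pre ++ acc :: (acc ++ b) :: pvChains (acc ++ b) rest
          = (pre ++ [acc]) ++ (acc ++ b) :: pvChains (acc ++ b) rest := by simp
      have h4 : pre.length + 1 = (pre ++ [acc]).length := by simp
      rw [h3, h4, ih]
      have h5 : (pre ++ [acc]) ++ pvMergeRun (acc ++ b) rest
          = pre ++ acc :: pvMergeRun (acc ++ b) rest := by simp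
      rw [h5]
      unfold pvPopStep
      rw [PySem.List.pop?_natCast (pre ++ acc :: pvMergeRun (acc ++ b) rest) pre.length (by simp)]
      simp [pv_erase_mid]

theorem pv_foldB (rest : List String) : ∀ (pre : List String) (acc : String),
    rest.foldl pvStepB (pre ++ [acc]) = pre ++ pvMergeRun acc rest := by
  induction rest with
  | nil => intro pre acc; simp [pvMergeRun]
  | cons b rest ih =>
    intro pre acc
    rw [List.foldl_cons]
    have hstep : pvStepB (pre ++ [acc]) b
        = if pvGlue acc b then pre ++ [acc ++ b] else (pre ++ [acc]) ++ [b] := by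
      unfold pvStepB
      simp only [PySem.List.pyGet?_neg_one_append_singleton, Option.getD_some,
        pv_strHead, pv_strLastB, pv_setD_last]
      have hne : (pre ++ [acc]).isEmpty = false := by simp
      rcases hg : pvGlue acc b with _ | _ <;> simp_all [pvGlue]
    rw [hstep]
    rcases hg : pvGlue acc b with _ | _
    · rw [if_neg (by simp), ih]
      simp [pvMergeRun, hg]
    · rw [if_pos rfl, ih]
      simp [pvMergeRun, hg]

theorem pv_ports_eq (list : List String) :
    concatSpltNumString list = concatSpltNumString_alt list := by
  cases list with
  | nil => rfl
  | cons x xs =>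
    have hp := pv_phase1 xs [] x []
    have e : ((([] : List String).length : Int) + 1) + ((xs.length : ℕ) : Int)
        = (((x :: xs).length : ℕ) : Int) := by
      simp; ring
    rw [e] at hp
    simp only [List.length_nil, Nat.cast_zero, zero_add, List.nil_append] at hp
    have hA : concatSpltNumString (x :: xs)
        = (pvRemIdx 0 x xs).foldr (fun j lst => pvPopStep lst j) (x :: pvChains x xs) := by
      unfold concatSpltNumString
      rw [hp, pv_popFoldr]
    have hB : concatSpltNumString_alt (x :: xs) = pvMergeRun x xs := by
      unfold concatSpltNumString_alt
      rw [List.foldl_cons]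
      have hx : pvStepB [] x = [] ++ [x] := by simp [pvStepB]
      rw [hx, pv_foldB xs [] x]
      simp
    rw [hA, hB]
    have := pv_popMain xs [] x
    simpa using this

-- ===== VERDICT (by name: the statement is the Claim_ definition above) =====
theorem concatSpltNumString_spec : Claim_equal_concatSpltNumString := by
  intro list _ _
  simpa [Spec_concatSpltNumString] using pv_ports_eq list
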